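-- pv_equiv track=rewrite | github.com/JaredBears/Formation-Python | ReduceList.py | reduceSum
-- ===== SOURCE A (Python) =====
-- def reduceSum(input: list[int]) -> int:
--     if len(input) == 0:
--         return 0
--     def helper(index):
--         if index == 0:
--             return input[0]
--         for i in range(0, index):
--             input[i] += input[i + 1]
--         return helper(index - 1)
--     return helper(len(input)-1)
-- ===== SOURCE B (Python) =====
-- def reduceSum(input: list[int]) -> int:
--     n = len(input)
--     total = 0
--     c = 1  # c == C(n-1, i) at the start of iteration i
--     i = 0
--     for x in input:
--         total += c * x
--         c = c * (n - 1 - i) // (i + 1)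
--         i += 1
--     return total
-- ===== Notes on version B (the rewrite author's own statement) =====
-- stated objective: faster
-- what changed: Replaced the quadratic in-place adjacent-sum reduction (n passes over the list) by a single pass that maintains the binomial coefficient C(n-1,i) incrementally via c = c*(n-1-i)//(i+1) and accumulates the weighted sum; B also does not mutate the input list.
import Mathlib
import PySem

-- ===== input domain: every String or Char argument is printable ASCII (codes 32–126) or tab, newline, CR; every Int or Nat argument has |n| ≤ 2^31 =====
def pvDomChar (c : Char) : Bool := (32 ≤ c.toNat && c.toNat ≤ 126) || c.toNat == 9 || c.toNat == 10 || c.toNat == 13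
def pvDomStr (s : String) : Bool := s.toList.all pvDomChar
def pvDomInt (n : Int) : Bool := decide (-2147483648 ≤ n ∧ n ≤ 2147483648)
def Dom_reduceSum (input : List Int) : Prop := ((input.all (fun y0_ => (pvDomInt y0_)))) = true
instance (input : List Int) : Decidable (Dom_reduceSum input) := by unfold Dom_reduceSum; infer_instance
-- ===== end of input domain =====

-- B replaces A's quadratic in-place adjacent-sum passes by one pass with incrementally
-- updated binomial coefficients (objective: faster). A mutates its argument in place;
-- B does not: the equivalence proved here is about the RETURN value only.

-- ===== PORT A =====
-- inner 'for i in range(0, index): input[i] += input[i+1]' — all indices are in range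
-- whenever index ≤ length (true on every call), so getD/set transcribe the accesses exactly
def pvLoopA (l : List Int) (i index : Nat) : List Int :=
  if _h : i < index then
    pvLoopA (l.set i (l.getD i 0 + l.getD (i + 1) 0)) (i + 1) index
  else l
termination_by index - i

def pvHelperA (l : List Int) (index : Nat) : Int :=
  if index = 0 then l.getD 0 0
  else pvHelperA (pvLoopA l 0 index) (index - 1)

def reduceSum (input : List Int) : Int :=
  if input.length = 0 then 0 else pvHelperA input (input.length - 1)

-- ===== PORT B =====
-- the 'for x in input' loop of Source B with state (i, total, c)
def pvGoB (n : Nat) (xs : List Int) (i : Nat) (total c : Int) : Int :=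
  match xs with
  | [] => total
  | x :: rest =>
      pvGoB n rest (i + 1) (total + c * x)
        (PySem.Int.floordiv (c * ((n : Int) - 1 - (i : Int))) ((i : Int) + 1))

def reduceSum_alt (input : List Int) : Int :=
  pvGoB input.length input 0 0 1

-- ===== PRECONDITION & SPEC =====
def Spec_reduceSum (input : List Int) (out : Int) : Prop := out = reduceSum_alt input
instance (input : List Int) (out : Int) : Decidable (Spec_reduceSum input out) := by unfold Spec_reduceSum; infer_instance

-- ===== CLAIM (what is proved, stated in full; the proofs are below) =====
def Claim_equal_reduceSum : Prop := ∀ (input : List Int), Dom_reduceSum input → Spec_reduceSum input (reduceSum input)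

-- ===== LEMMAS AND PROOFS =====

-- common mathematical form: Σ_{i<m+1} C(m,i)·l[i]  (getD pads with 0)
def pvS (m : Nat) (l : List Int) : Int :=
  ∑ i ∈ Finset.range (m + 1), ((Nat.choose m i : Int) * l.getD i 0)

-- B-side shifted sum Σ_j C(m,j+…)·xs[j], structural on the list
def pvBSum (m j : Nat) (xs : List Int) : Int :=
  match xs with
  | [] => 0
  | x :: rest => (Nat.choose m j : Int) * x + pvBSum m (j + 1) rest

theorem pvLoopA_length (l : List Int) (i index : Nat) :
    (pvLoopA l i index).length = l.length := by
  unfold pvLoopA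
  split
  · rw [pvLoopA_length]; simp
  · rfl
termination_by index - i

theorem pvLoopA_getD (l : List Int) (j index : Nat) (hle : index ≤ l.length) (i : Nat) :
    (pvLoopA l j index).getD i 0 =
      if j ≤ i ∧ i < index then l.getD i 0 + l.getD (i + 1) 0 else l.getD i 0 := by
  unfold pvLoopA
  split
  · next h =>
    rw [pvLoopA_getD _ _ _ (by simpa using hle)]
    rcases Nat.lt_trichotomy i j with hij | hij | hij
    · have h1 : ¬ (j + 1 ≤ i ∧ i < index) := by omega
      have h2 : ¬ (j ≤ i ∧ i < index) := by omega
      have hne : j ≠ i := by omega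
      simp [h2, List.getD, List.getElem?_set, hne]
      intro h3 _
      exact absurd h3 (by omega)
    · subst hij
      have h1 : ¬ (i + 1 ≤ i ∧ i < index) := by omega
      have h2 : i ≤ i ∧ i < index := by omega
      have hlen : i < l.length := by omega
      simp [h2, List.getD, hlen]
    · have hne1 : j ≠ i := by omega
      have hne2 : j ≠ i + 1 := by omega
      by_cases hc : j + 1 ≤ i ∧ i < index
      · have hc' : j ≤ i ∧ i < index := by omega
        simp [hc, hc', List.getD, hne1, hne2]
      · have hc' : ¬ (j ≤ i ∧ i < index) := by omega
        simp [hc', List.getD, hne1, hne2]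
        intro _ h4
        exact absurd h4 (by omega)
  · next h =>
    have : ¬ (j ≤ i ∧ i < index) := by omega
    simp [this]
termination_by index - j

-- one pass turns the C(k,·)-sum into the C(k+1,·)-sum (Pascal's rule)
theorem pvS_loopA (k : Nat) (l : List Int) (hlen : k + 1 ≤ l.length) :
    pvS k (pvLoopA l 0 (k + 1)) = pvS (k + 1) l := by
  unfold pvS
  have hcong : ∀ i ∈ Finset.range (k + 1),
      ((Nat.choose k i : Int) * (pvLoopA l 0 (k + 1)).getD i 0) =
      ((Nat.choose k i : Int) * (l.getD i 0 + l.getD (i + 1) 0)) := by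
    intro i hi
    rw [pvLoopA_getD l 0 (k + 1) hlen i]
    have : 0 ≤ i ∧ i < k + 1 := by simp at hi; omega
    simp [this]
  rw [Finset.sum_congr rfl hcong]
  have expand : ∀ i ∈ Finset.range (k + 1),
      ((Nat.choose k i : Int) * (l.getD i 0 + l.getD (i + 1) 0)) =
      ((Nat.choose k i : Int) * l.getD i 0 + (Nat.choose k i : Int) * l.getD (i + 1) 0) := by
    intro i _; ring
  rw [Finset.sum_congr rfl expand, Finset.sum_add_distrib]
  -- RHS: peel off the first term and use Pascal
  rw [Finset.sum_range_succ' (fun i => ((Nat.choose (k + 1) i : Int) * l.getD i 0))]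
  have pascal : ∀ i ∈ Finset.range (k + 1),
      ((Nat.choose (k + 1) (i + 1) : Int) * l.getD (i + 1) 0) =
      ((Nat.choose k i : Int) * l.getD (i + 1) 0 + (Nat.choose k (i + 1) : Int) * l.getD (i + 1) 0) := by
    intro i _
    rw [Nat.choose_succ_succ]
    push_cast
    ring
  rw [Finset.sum_congr rfl pascal, Finset.sum_add_distrib]
  have first : ∑ i ∈ Finset.range (k + 1), ((Nat.choose k i : Int) * l.getD i 0) =
      (Nat.choose (k + 1) 0 : Int) * l.getD 0 0 +
      ∑ i ∈ Finset.range (k + 1), ((Nat.choose k (i + 1) : Int) * l.getD (i + 1) 0) := by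
    have : ∑ i ∈ Finset.range (k + 2), ((Nat.choose k i : Int) * l.getD i 0) =
        ∑ i ∈ Finset.range (k + 1), ((Nat.choose k i : Int) * l.getD i 0) := by
      rw [Finset.sum_range_succ]
      simp
    rw [← this, Finset.sum_range_succ' (fun i => ((Nat.choose k i : Int) * l.getD i 0))]
    simp
    ring
  rw [first]
  ring

-- A's helper computes the binomial-weighted sum
theorem pvHelperA_eq (index : Nat) (l : List Int) (h : index < l.length) :
    pvHelperA l index = pvS index l := by
  induction index generalizing l with
  | zero =>
    unfold pvHelperA pvS
    simp
  | succ k ih =>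
    unfold pvHelperA
    simp only [Nat.succ_ne_zero, if_false, Nat.add_sub_cancel]
    rw [ih _ (by rw [pvLoopA_length]; omega)]
    exact pvS_loopA k l (by omega)

-- B's loop invariant: with c = C(n-1,k) the fold adds the shifted binomial sum
theorem pvGoB_eq (xs : List Int) (k : Nat) (total : Int) (n : Nat)
    (hn : n = k + xs.length) :
    pvGoB n xs k total ((Nat.choose (n - 1) k : Int)) = total + pvBSum (n - 1) k xs := by
  induction xs generalizing k total with
  | nil => simp [pvGoB, pvBSum]
  | cons x rest ih =>
    unfold pvGoB pvBSum
    have hk : k ≤ n - 1 := by simp at hn; omega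
    have hcast : ((Nat.choose (n - 1) k : Int) * ((n : Int) - 1 - (k : Int))) =
        ((Nat.choose (n - 1) k * (n - 1 - k) : Nat) : Int) := by
      have h1 : ((n - 1 - k : Nat) : Int) = (n : Int) - 1 - (k : Int) := by
        have : 1 ≤ n := by simp at hn; omega
        push_cast [Nat.cast_sub (by omega : k ≤ n - 1), Nat.cast_sub (by omega : 1 ≤ n)]
        ring
      rw [← h1]; push_cast; ring
    have hdiv : PySem.Int.floordiv ((Nat.choose (n - 1) k * (n - 1 - k) : Nat) : Int)
        ((k : Int) + 1) = ((Nat.choose (n - 1) (k + 1) : Int)) := by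
      have : ((k : Int) + 1) = ((k + 1 : Nat) : Int) := by push_cast; ring
      rw [this, PySem.Int.floordiv_natCast]
      congr 1
      have hrec : Nat.choose (n - 1) (k + 1) * (k + 1) = Nat.choose (n - 1) k * (n - 1 - k) :=
        Nat.choose_succ_right_eq (n - 1) k
      rw [← hrec, Nat.mul_div_cancel _ (by omega)]
    rw [hcast, hdiv, ih (k + 1) (total + (Nat.choose (n - 1) k : Int) * x) (by simp at hn ⊢; omega)]
    ring

-- pvBSum from 0 equals the Finset form pvS (getD pads with 0, choose vanishes past m)
theorem pvBSum_eq_range (m j : Nat) (xs : List Int) :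
    pvBSum m j xs = ∑ i ∈ Finset.range xs.length, ((Nat.choose m (j + i) : Int) * xs.getD i 0) := by
  induction xs generalizing j with
  | nil => simp [pvBSum]
  | cons x rest ih =>
    unfold pvBSum
    rw [ih (j + 1)]
    simp only [List.length_cons]
    rw [Finset.sum_range_succ' (fun i => ((Nat.choose m (j + i) : Int) * (x :: rest).getD i 0))]
    simp only [List.getD_cons_succ, List.getD_cons_zero, Nat.add_zero]
    have : ∀ i ∈ Finset.range rest.length,
        ((Nat.choose m (j + 1 + i) : Int) * rest.getD i 0) =
        ((Nat.choose m (j + (i + 1)) : Int) * rest.getD i 0) := by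
      intro i _
      have h5 : j + 1 + i = j + (i + 1) := by omega
      rw [h5]
    rw [Finset.sum_congr rfl this]
    ring

theorem pvBSum_eq_pvS (m : Nat) (xs : List Int) : pvBSum m 0 xs = pvS m xs := by
  rw [pvBSum_eq_range, pvS]
  rcases Nat.le_total xs.length (m + 1) with h | h
  · rw [← Finset.sum_subset (show Finset.range xs.length ⊆ Finset.range (m + 1) by
        intro x hx; simp at hx ⊢; omega)]
    · exact Finset.sum_congr rfl (fun i _ => by simp)
    · intro i _ hi
      simp at hi
      simp [List.getD, List.getElem?_eq_none (by omega : xs.length ≤ i)]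
  · rw [← Finset.sum_subset (show Finset.range (m + 1) ⊆ Finset.range xs.length by
        intro x hx; simp at hx ⊢; omega)]
    · exact Finset.sum_congr rfl (fun i _ => by simp)
    · intro i _ hi
      simp at hi
      simp [Nat.choose_eq_zero_of_lt (by omega : m < i)]

-- ===== VERDICT (by name: the statement is the Claim_ definition above) =====
theorem reduceSum_spec : Claim_equal_reduceSum := by
  intro input _
  unfold Spec_reduceSum reduceSum reduceSum_alt
  by_cases h : input.length = 0
  · rcases List.eq_nil_of_length_eq_zero h with rfl
    simp [pvGoB]
  · have h1 : 1 ≤ input.length := by omega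
    have hchoose : (1 : Int) = ((Nat.choose (input.length - 1) 0 : Nat) : Int) := by simp
    rw [if_neg h, hchoose,
      pvGoB_eq input 0 0 input.length (by omega),
      pvHelperA_eq (input.length - 1) input (by omega),
      pvBSum_eq_pvS]
    ring
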